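-- pv_equiv track=rewrite | github.com/LazyEntity/leetcode | microsoft/Circle.py | solution
-- ===== SOURCE A (Python) =====
-- def solution(arr):
--     idx, size, result = 0, len(arr), 0
--     if (arr[0] + arr[-1]) % 2 == 0:
--         idx, size, result = 1, size - 1, 1
--     while idx < size - 1:
--         if (arr[idx] + arr[idx + 1]) % 2 == 0:
--             result += 1
--             idx += 1
--         idx += 1
--     return result
-- ===== SOURCE B (Python) =====
-- def solution(arr):
--     n = len(arr)
--     if (arr[0] + arr[-1]) % 2 == 0:
--         result, seg = 1, arr[1:n - 1]
--     else:
--         result, seg = 0, arr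
--     prev, L = None, 0
--     for x in seg:
--         p = x % 2
--         if p == prev:
--             L += 1
--         else:
--             result += L // 2
--             prev, L = p, 1
--     return result + L // 2
-- ===== Notes on version B (the rewrite author's own statement) =====
-- stated objective: alternative
-- what changed: Replaced A's greedy match-and-skip index walk with a single run-length scan that adds floor(L/2) per maximal same-parity run (after peeling the circular first/last pair into a slice of the interior).
import Mathlib
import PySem

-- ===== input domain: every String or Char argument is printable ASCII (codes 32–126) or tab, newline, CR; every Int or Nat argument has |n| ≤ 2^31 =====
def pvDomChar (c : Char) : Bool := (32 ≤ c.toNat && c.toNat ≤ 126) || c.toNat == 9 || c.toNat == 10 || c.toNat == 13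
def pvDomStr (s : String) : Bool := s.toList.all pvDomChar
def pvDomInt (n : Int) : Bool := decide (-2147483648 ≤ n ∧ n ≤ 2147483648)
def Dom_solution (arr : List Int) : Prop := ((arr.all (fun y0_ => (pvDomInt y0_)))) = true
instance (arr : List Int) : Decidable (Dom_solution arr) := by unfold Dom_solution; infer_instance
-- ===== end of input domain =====

-- B replaces A's greedy match-and-skip index walk by a single run-length scan (floor(L/2) pairs per
-- maximal same-parity run); objective: alternative decomposition, same O(n) cost.

-- ===== PORT A =====
-- A's while loop: state (idx, result); every index read satisfies idx + 1 < size ≤ |arr|,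
-- so arr.getD i 0 is exactly Python's arr[i] there (the default is never taken).
def solutionLoopA (arr : List Int) (size : Nat) (idx : Nat) (result : Int) : Int :=
  if _h : idx + 1 < size then
    if PySem.Int.mod (arr.getD idx 0 + arr.getD (idx + 1) 0) 2 == 0 then
      solutionLoopA arr size (idx + 2) (result + 1)
    else
      solutionLoopA arr size (idx + 1) result
  else result
termination_by size - idx

def solution (arr : List Int) : Int :=
  let n := arr.length
  -- first and last element; Pre_solution excludes the empty list (IndexError), so getD never defaults
  if PySem.Int.mod (arr.getD 0 0 + arr.getD (n - 1) 0) 2 == 0 then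
    solutionLoopA arr (n - 1) 1 1
  else
    solutionLoopA arr n 0 0

-- ===== PORT B =====
-- Source B's for loop over seg with state (result, prev, L); L ≥ 0 always, so Python's L // 2 is Nat division.
def runLoopB (seg : List Int) (result : Int) (prev : Option Int) (L : Nat) : Int :=
  match seg with
  | [] => result + ((L / 2 : Nat) : Int)
  | x :: rest =>
    let p := PySem.Int.mod x 2
    if some p == prev then runLoopB rest result prev (L + 1)
    else runLoopB rest (result + ((L / 2 : Nat) : Int)) (some p) 1

def solution_alt (arr : List Int) : Int :=
  let n := arr.length
  if PySem.Int.mod (arr.getD 0 0 + arr.getD (n - 1) 0) 2 == 0 then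
    runLoopB (PySem.List.slice arr (some 1) (some ((n : Int) - 1))) 1 none 0
  else
    runLoopB arr 0 none 0

-- ===== PRECONDITION & SPEC =====
-- Pre_ excludes only the empty list, on which A raises IndexError reading the first element.
def Pre_solution (arr : List Int) : Prop := arr ≠ []
instance (arr : List Int) : Decidable (Pre_solution arr) := by unfold Pre_solution; infer_instance
def pvWitness_solution : List Int := [2, 4, 7, 7, 3]

def Spec_solution (arr : List Int) (out : Int) : Prop := out = solution_alt arr
instance (arr : List Int) (out : Int) : Decidable (Spec_solution arr out) := by unfold Spec_solution; infer_instance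

-- ===== CLAIM (what is proved, stated in full; the proofs are below) =====
def Claim_equal_solution : Prop := ∀ (arr : List Int), Dom_solution arr → Pre_solution arr → Spec_solution arr (solution arr)

-- ===== LEMMAS AND PROOFS =====

-- Reference function: greedy adjacent same-parity pair count on a plain list (the value both loops compute).
def pvGreedy : List Int → Int
  | [] => 0
  | [_] => 0
  | x :: y :: rest =>
    if PySem.Int.mod (x + y) 2 == 0 then 1 + pvGreedy rest else pvGreedy (y :: rest)

theorem pv_parity_mm (x y : Int) :
    PySem.Int.mod (PySem.Int.mod x 2 + PySem.Int.mod y 2) 2 = PySem.Int.mod (x + y) 2 := by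
  simp only [PySem.Int.mod_eq_emod_of_pos (show (0:Int) < 2 by omega)]
  omega

theorem mod_two_cases (x : Int) : PySem.Int.mod x 2 = 0 ∨ PySem.Int.mod x 2 = 1 := by
  have h1 := PySem.Int.mod_nonneg x (show (0:Int) < 2 by omega)
  have h2 := PySem.Int.mod_lt x (show (0:Int) < 2 by omega)
  omega

-- pvGreedy only looks at parities.
theorem greedy_map (l : List Int) :
    pvGreedy (l.map (fun x => PySem.Int.mod x 2)) = pvGreedy l := by
  induction l using pvGreedy.induct with
  | case1 => rfl
  | case2 x => rfl
  | case3 x y rest h ih =>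
      simp only [List.map, pvGreedy, pv_parity_mm, h, if_pos, ih]
  | case4 x y rest h ih =>
      simp only [List.map, pvGreedy, pv_parity_mm, h] at ih ⊢
      exact ih

-- A maximal run of L equal values followed by a parity break contributes L / 2 pairs.
theorem greedy_run (L : Nat) (p : Int) (rest : List Int)
    (h : ∀ r, rest.head? = some r → ¬ PySem.Int.mod (p + r) 2 = 0) :
    pvGreedy (List.replicate L p ++ rest) = ((L / 2 : Nat) : Int) + pvGreedy rest := by
  induction L using Nat.strong_induction_on with
  | _ L ih =>
    match L with
    | 0 => simp
    | 1 =>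
      cases rest with
      | nil => simp [pvGreedy]
      | cons r t =>
        have hr := h r rfl
        simp only [List.replicate, List.nil_append, List.cons_append, pvGreedy]
        rw [if_neg (by simpa using hr)]
        simp
    | (N + 2) =>
      have h2 : PySem.Int.mod (p + p) 2 = 0 := by
        rw [PySem.Int.mod_eq_zero_iff_dvd]; exact ⟨p, by ring⟩
      simp only [List.replicate, List.cons_append, pvGreedy]
      rw [if_pos (by simpa using h2), ih N (by omega)]
      push_cast [Nat.add_div_right]
      ring

-- The window arr[idx:size] starts with arr[idx] when idx < size ≤ |arr|.
theorem window_cons (arr : List Int) (size i : Nat) (hsz : size ≤ arr.length) (hi : i < size) :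
    (arr.take size).drop i = arr.getD i 0 :: (arr.take size).drop (i + 1) := by
  have hlen : (arr.take size).length = size := by simp [Nat.min_eq_left hsz]
  have hi' : i < (arr.take size).length := by omega
  rw [List.drop_eq_getElem_cons hi']
  congr 1
  rw [List.getElem_take, List.getD_eq_getElem arr 0 (by omega)]

-- A's loop computes result + pvGreedy of the window arr[idx:size].
theorem loopA_eq (arr : List Int) (size : Nat) (hsz : size ≤ arr.length) (idx : Nat) (result : Int) :
    solutionLoopA arr size idx result = result + pvGreedy ((arr.take size).drop idx) := by
  fun_induction solutionLoopA arr size idx result with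
  | case1 idx result h hc ih =>
      rw [ih, window_cons arr size idx hsz (by omega), window_cons arr size (idx+1) hsz (by omega),
          pvGreedy, if_pos hc]
      ring
  | case2 idx result h hc ih =>
      rw [ih, window_cons arr size idx hsz (by omega), window_cons arr size (idx+1) hsz (by omega),
          pvGreedy, if_neg hc]
  | case3 idx result h =>
      have : ((arr.take size).drop idx).length ≤ 1 := by
        simp only [List.length_drop, List.length_take]; omega
      match hm : (arr.take size).drop idx, this with
      | [], _ => simp [pvGreedy]
      | [x], _ => simp [pvGreedy]

-- B's loop invariant: prev = some p with a pending run of L copies of p.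
theorem loopB_inv (seg : List Int) :
    ∀ (result p : Int) (L : Nat), 1 ≤ L → (p = 0 ∨ p = 1) →
      runLoopB seg result (some p) L
        = result + pvGreedy (List.replicate L p ++ seg.map (fun x => PySem.Int.mod x 2)) := by
  induction seg with
  | nil =>
      intro result p L hL hp
      simp only [runLoopB, List.map_nil, List.append_nil]
      have := greedy_run L p [] (by simp)
      simp only [List.append_nil] at this
      rw [this]
      simp [pvGreedy]
  | cons x rest ih =>
      intro result p L hL hp
      by_cases hq : PySem.Int.mod x 2 = p
      · rw [runLoopB]
        simp only [hq, BEq.rfl, if_pos]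
        rw [ih result p (L+1) (by omega) hp, List.map_cons, hq,
            show List.replicate (L+1) p ++ rest.map (fun x => PySem.Int.mod x 2)
               = List.replicate L p ++ p :: rest.map (fun x => PySem.Int.mod x 2) by
              rw [List.replicate_succ', List.append_assoc]; rfl]
      · rw [runLoopB]
        rw [if_neg (by simpa using hq)]
        rw [ih _ (PySem.Int.mod x 2) 1 (by omega) (mod_two_cases x)]
        rw [List.map_cons]
        rw [greedy_run L p _ (by
          intro r hr
          simp only [List.head?_cons, Option.some.injEq] at hr
          subst hr
          have hq' := hq
          simp only [PySem.Int.mod_eq_emod_of_pos (show (0:Int) < 2 by omega)] at hq' ⊢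
          rcases hp with hp | hp <;> subst hp <;> omega)]
        rw [show List.replicate 1 (PySem.Int.mod x 2) ++ rest.map (fun x => PySem.Int.mod x 2)
             = PySem.Int.mod x 2 :: rest.map (fun x => PySem.Int.mod x 2) from rfl]
        ring

theorem loopB_eq (seg : List Int) (result : Int) :
    runLoopB seg result none 0 = result + pvGreedy seg := by
  cases seg with
  | nil => simp [runLoopB, pvGreedy]
  | cons x rest =>
      rw [runLoopB]
      rw [if_neg (by simp)]
      simp only [Nat.zero_div, Nat.cast_zero, add_zero]
      rw [loopB_inv rest result (PySem.Int.mod x 2) 1 (by omega) (mod_two_cases x)]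
      rw [show List.replicate 1 (PySem.Int.mod x 2) ++ rest.map (fun x => PySem.Int.mod x 2)
           = (x :: rest).map (fun x => PySem.Int.mod x 2) from rfl, greedy_map]

-- ===== VERDICT (by name: the statement is the Claim_ definition above) =====
theorem solution_spec : Claim_equal_solution := by
  intro arr _ hpre
  unfold Spec_solution solution solution_alt
  have hn : 1 ≤ arr.length := List.length_pos_iff.mpr hpre
  by_cases hc : (PySem.Int.mod (arr.getD 0 0 + arr.getD (arr.length - 1) 0) 2 == 0) = true
  · -- same-parity circular pair: interior window arr[1 : n-1]
    simp only [hc, if_true]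
    rw [loopA_eq arr (arr.length - 1) (by omega) 1 1, loopB_eq]
    congr 1
    rw [show ((arr.length : Int) - 1) = ((arr.length - 1 : Nat) : Int) by omega,
        show ((1 : Int)) = ((1 : Nat) : Int) from rfl,
        PySem.List.slice_natCast, List.drop_take]
  · simp only [hc, Bool.false_eq_true, if_false]
    rw [loopA_eq arr arr.length (le_refl _) 0 0, loopB_eq, List.take_length, List.drop_zero]
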